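-- pv_equiv track=rewrite | github.com/Insightpulseai/odoo | odoo/odoo/packages/odoo-docs-kb/chunker.py | _strip_directives
-- ===== SOURCE A (Python) =====
-- STRIP_DIRECTIVES = frozenset(
--     [".. image::", ".. figure::", ".. raw::", ".. only::"]
-- )
--
-- def _strip_directives(text: str) -> str:
--     """Remove content of directives that should be stripped."""
--     lines = text.split("\n")
--     result = []
--     skip_indent = None
--
--     for line in lines:
--         stripped = line.lstrip()
--         if skip_indent is not None:
--             # Inside a stripped directive — skip indented content
--             if line == "" or (len(line) - len(stripped) > skip_indent):
--                 continue
--             else: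
--                 skip_indent = None
--
--         if any(stripped.startswith(d) for d in STRIP_DIRECTIVES):
--             skip_indent = len(line) - len(stripped)
--             continue
--
--         result.append(line)
--
--     return "\n".join(result)
-- ===== SOURCE B (Python) =====
-- STRIP_DIRECTIVES = frozenset(
--     [".. image::", ".. figure::", ".. raw::", ".. only::"]
-- )
--
-- def _strip_directives(text: str) -> str:
--     """Remove content of directives that should be stripped (index-driven scan)."""
--     lines = text.split("\n")
--     n = len(lines)
--     out = []
--     i = 0
--     while i < n:
--         line = lines[i]
--         stripped = line.lstrip()
--         if any(stripped.startswith(d) for d in STRIP_DIRECTIVES):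
--             d = len(line) - len(stripped)
--             j = i + 1
--             while j < n and (lines[j] == "" or len(lines[j]) - len(lines[j].lstrip()) > d):
--                 j += 1
--             i = j
--         else:
--             out.append(line)
--             i += 1
--     return "\n".join(out)
-- ===== Notes on version B (the rewrite author's own statement) =====
-- stated objective: alternative
-- what changed: Replaces the carried skip_indent state machine (one flag threaded through every line) with an index-driven scan: on a directive line an inner while-loop advances past the indented block, and the first less-indented line is reprocessed by the outer loop.
import Mathlib
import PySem

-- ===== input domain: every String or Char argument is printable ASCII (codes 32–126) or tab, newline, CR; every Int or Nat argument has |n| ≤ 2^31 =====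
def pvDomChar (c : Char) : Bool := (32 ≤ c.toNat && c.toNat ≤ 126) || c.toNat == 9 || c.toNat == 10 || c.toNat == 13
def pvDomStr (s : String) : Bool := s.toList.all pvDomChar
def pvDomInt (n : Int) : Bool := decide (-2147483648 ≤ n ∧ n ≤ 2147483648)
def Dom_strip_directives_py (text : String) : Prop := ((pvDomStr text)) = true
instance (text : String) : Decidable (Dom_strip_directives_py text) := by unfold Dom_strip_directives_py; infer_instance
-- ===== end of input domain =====

-- B replaces A's carried skip_indent state machine with an index-driven scan whose
-- inner loop skips a directive's indented block; same O(n) cost (objective: alternative).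

-- shared helpers (the same module constants / expressions in both Pythons)
def pvStripDirs : List String := [".. image::", ".. figure::", ".. raw::", ".. only::"]

def pvIsDir (stripped : String) : Bool :=
  pvStripDirs.any (fun d => PySem.Str.startswith stripped d)

-- len(line) - len(line.lstrip())
def pvIndent (line : String) : Int :=
  PySem.Str.len line - PySem.Str.len (PySem.Str.lstrip line)

-- ===== PORT A =====
-- the loop body of A: skip-state check falls through to the directive check, as in the Python
def pvStepA (st : List String × Option Int) (line : String) : List String × Option Int :=
  let stripped := PySem.Str.lstrip line
  let proc : List String × Option Int :=
    if pvIsDir stripped then (st.1, some (pvIndent line))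
    else (st.1 ++ [line], none)
  match st.2 with
  | some k => if line == "" || pvIndent line > k then (st.1, some k) else proc
  | none => proc

def strip_directives_py (text : String) : String :=
  let lines := (PySem.Str.split? text "\n").getD []  -- sep "\n" ≠ "", so split? is always some
  PySem.Str.join "\n" ((lines.foldl pvStepA ([], none)).1)

-- ===== PORT B =====
-- inner while loop of B: advance past blank or more-indented lines
def pvDropBlock (d : Int) : List String → List String
  | [] => []
  | l :: rest => if l == "" || pvIndent l > d then pvDropBlock d rest else l :: rest

theorem pvDropBlock_length_le (d : Int) (xs : List String) :
    (pvDropBlock d xs).length ≤ xs.length := by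
  induction xs with
  | nil => simp [pvDropBlock]
  | cons l rest ih =>
    simp only [pvDropBlock]
    split
    · exact Nat.le_succ_of_le ih
    · simp

-- outer loop of B over the remaining lines
def pvScanB : List String → List String
  | [] => []
  | l :: rest =>
    if pvIsDir (PySem.Str.lstrip l) then pvScanB (pvDropBlock (pvIndent l) rest)
    else l :: pvScanB rest
termination_by xs => xs.length
decreasing_by
  · exact Nat.lt_succ_of_le (pvDropBlock_length_le _ _)
  · simp

def strip_directives_py_alt (text : String) : String :=
  PySem.Str.join "\n" (pvScanB ((PySem.Str.split? text "\n").getD []))  -- sep "\n" ≠ "", so split? is always some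

-- ===== PRECONDITION & SPEC =====
def Spec_strip_directives_py (text : String) (out : String) : Prop := out = strip_directives_py_alt text
instance (text : String) (out : String) : Decidable (Spec_strip_directives_py text out) := by unfold Spec_strip_directives_py; infer_instance

-- ===== CLAIM (what is proved, stated in full; the proofs are below) =====
def Claim_equal_strip_directives_py : Prop := ∀ (text : String), Dom_strip_directives_py text → Spec_strip_directives_py text (strip_directives_py text)

-- ===== LEMMAS AND PROOFS =====

-- A's fold written as structural recursion on the line list (proof helper)
def pvRunA : List String → Option Int → List String
  | [], _ => []
  | l :: rest, skip =>
    let proc : List String :=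
      if pvIsDir (PySem.Str.lstrip l) then pvRunA rest (some (pvIndent l))
      else l :: pvRunA rest none
    match skip with
    | some k => if l == "" || pvIndent l > k then pvRunA rest (some k) else proc
    | none => proc

theorem pvFoldA_eq (lines : List String) :
    ∀ (acc : List String) (skip : Option Int),
      (lines.foldl pvStepA (acc, skip)).1 = acc ++ pvRunA lines skip := by
  induction lines with
  | nil => intro acc skip; simp [pvRunA]
  | cons l rest ih =>
    intro acc skip
    simp only [List.foldl_cons, pvRunA]
    cases skip with
    | some k =>
      by_cases h : (l == "" || pvIndent l > k) = true
      · simp [pvStepA, h, ih]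
      · by_cases hd : pvIsDir (PySem.Str.lstrip l) = true
        · simp [pvStepA, h, hd, ih]
        · simp [pvStepA, h, hd, ih]
    | none =>
      by_cases hd : pvIsDir (PySem.Str.lstrip l) = true
      · simp [pvStepA, hd, ih]
      · simp [pvStepA, hd, ih]

-- while in skip mode, A drops exactly the lines B's inner loop drops, then resumes fresh
theorem pvRunA_some (d : Int) (xs : List String) :
    pvRunA xs (some d) = pvRunA (pvDropBlock d xs) none := by
  induction xs with
  | nil => simp [pvRunA, pvDropBlock]
  | cons l rest ih =>
    by_cases h : (l == "" || pvIndent l > d) = true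
    · simp [pvRunA, pvDropBlock, h, ih]
    · simp [pvRunA, pvDropBlock, h]

theorem pvRunA_none : ∀ (xs : List String), pvRunA xs none = pvScanB xs := by
  have key : ∀ (n : ℕ) (xs : List String), xs.length ≤ n → pvRunA xs none = pvScanB xs := by
    intro n
    induction n with
    | zero =>
      intro xs h
      have : xs = [] := List.eq_nil_of_length_eq_zero (Nat.le_zero.mp h)
      simp [this, pvRunA, pvScanB]
    | succ n ih =>
      intro xs h
      cases xs with
      | nil => simp [pvRunA, pvScanB]
      | cons l rest =>
        simp only [List.length_cons, Nat.succ_le_succ_iff] at h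
        by_cases hd : pvIsDir (PySem.Str.lstrip l) = true
        · rw [pvRunA, pvScanB]
          simp only [hd, if_true]
          rw [pvRunA_some]
          exact ih _ (le_trans (pvDropBlock_length_le _ _) h)
        · rw [pvRunA, pvScanB]
          simp [hd, ih rest h]
  exact fun xs => key xs.length xs le_rfl

-- ===== VERDICT (by name: the statement is the Claim_ definition above) =====
theorem strip_directives_py_spec : Claim_equal_strip_directives_py := by
  intro text _
  unfold Spec_strip_directives_py strip_directives_py strip_directives_py_alt
  dsimp only
  rw [pvFoldA_eq, pvRunA_none]
  simp
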